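-- pv_equiv track=rewrite | github.com/feerzx1/zettelvault | zettelvault/sample.py | compute_size_buckets
-- ===== SOURCE A (Python) =====
-- def compute_size_buckets(char_counts: list[int]) -> dict[str, tuple[int, int]]:
--     """Compute quartile boundaries for size bucketing.
--
--     Returns a dict mapping bucket names (Q1-Q4) to (min, max) char_count
--     ranges. With fewer than 4 notes, some buckets may overlap.
--     """
--     if not char_counts:
--         return {}
--
--     sorted_counts = sorted(char_counts)
--     n = len(sorted_counts)
--
--     if n < 4:
--         # With fewer than 4 notes, assign each to its own bucket
--         buckets = {}
--         for i, c in enumerate(sorted_counts):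
--             buckets[f"Q{i + 1}"] = (c, c)
--         return buckets
--
--     q1 = sorted_counts[n // 4]
--     q2 = sorted_counts[n // 2]
--     q3 = sorted_counts[3 * n // 4]
--
--     return {
--         "Q1": (sorted_counts[0], q1),
--         "Q2": (q1 + 1, q2),
--         "Q3": (q2 + 1, q3),
--         "Q4": (q3 + 1, sorted_counts[-1]),
--     }
-- ===== SOURCE B (Python) =====
-- def compute_size_buckets(char_counts: list[int]) -> dict[str, tuple[int, int]]:
--     """Quartile buckets via order-statistic selection (no full sort)."""
--     n = len(char_counts)
--     if n == 0:
--         return {}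
--
--     def kth(xs, k):
--         # k-th smallest (0-based) by three-way partition around the first element
--         p = xs[0]
--         lt = [x for x in xs if x < p]
--         if k < len(lt):
--             return kth(lt, k)
--         eq = sum(1 for x in xs if x == p)
--         if k < len(lt) + eq:
--             return p
--         return kth([x for x in xs if x > p], k - len(lt) - eq)
--
--     if n < 4:
--         return {f"Q{i + 1}": (kth(char_counts, i), kth(char_counts, i)) for i in range(n)}
--
--     q1 = kth(char_counts, n // 4)
--     q2 = kth(char_counts, n // 2)
--     q3 = kth(char_counts, 3 * n // 4)
--     return {
--         "Q1": (kth(char_counts, 0), q1),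
--         "Q2": (q1 + 1, q2),
--         "Q3": (q2 + 1, q3),
--         "Q4": (q3 + 1, kth(char_counts, n - 1)),
--     }
-- ===== Notes on version B (the rewrite author's own statement) =====
-- stated objective: alternative
-- what changed: B replaces A's full sort followed by quartile indexing with an order-statistic selection (recursive three-way-partition quickselect) that computes only the six needed order statistics, and builds the small-n buckets from selections instead of enumerating a sorted list.
import Mathlib
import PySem

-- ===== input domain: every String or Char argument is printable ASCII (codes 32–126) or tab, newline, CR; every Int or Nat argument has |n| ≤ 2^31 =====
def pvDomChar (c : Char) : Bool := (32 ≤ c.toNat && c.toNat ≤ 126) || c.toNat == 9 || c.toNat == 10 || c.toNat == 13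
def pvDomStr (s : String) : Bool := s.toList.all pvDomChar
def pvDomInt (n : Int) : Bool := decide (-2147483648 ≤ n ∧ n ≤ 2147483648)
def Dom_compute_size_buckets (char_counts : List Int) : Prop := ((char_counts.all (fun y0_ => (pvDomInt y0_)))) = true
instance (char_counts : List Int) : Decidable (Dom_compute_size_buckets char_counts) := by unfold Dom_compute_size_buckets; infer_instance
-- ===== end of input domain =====

-- B replaces A's full sort + indexing by an order-statistic selection (three-way-partition quickselect) for the few needed quantiles; objective: alternative algorithm.


-- ===== PORT A =====
def compute_size_buckets (char_counts : List Int) : List (String × Int × Int) :=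
  if char_counts = [] then []
  else
    let sorted_counts := PySem.List.sorted char_counts (fun x => x) false
    let n : Int := sorted_counts.length
    if n < 4 then
      ((PySem.List.enumerate sorted_counts).foldl
        (fun (buckets : PySem.Dict String (Int × Int)) ic =>
          buckets.insert ("Q" ++ PySem.Int.toStr (ic.1 + 1)) (ic.2, ic.2))
        PySem.Dict.empty).items
    else
      let q1 := (PySem.List.pyGet? sorted_counts (PySem.Int.floordiv n 4)).getD 0
      let q2 := (PySem.List.pyGet? sorted_counts (PySem.Int.floordiv n 2)).getD 0
      let q3 := (PySem.List.pyGet? sorted_counts (PySem.Int.floordiv (3 * n) 4)).getD 0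
      [("Q1", ((PySem.List.pyGet? sorted_counts 0).getD 0, q1)),
       ("Q2", (q1 + 1, q2)),
       ("Q3", (q2 + 1, q3)),
       ("Q4", (q3 + 1, (PySem.List.pyGet? sorted_counts (-1)).getD 0))]

-- ===== PORT B =====
-- k-th smallest (0-based) by three-way partition around the first element (Source B's kth)
def pvKth (xs : List Int) (k : Nat) : Int :=
  match xs with
  | [] => 0
  | p :: rest =>
    let lt := (p :: rest).filter (fun x => decide (x < p))
    if k < lt.length then pvKth lt k
    else
      let eq := (p :: rest).countP (fun x => decide (x = p))
      if k < lt.length + eq then p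
      else pvKth ((p :: rest).filter (fun x => decide (p < x))) (k - lt.length - eq)
termination_by xs.length
decreasing_by
  · simp only [List.filter_cons, decide_eq_true_eq, lt_irrefl, if_false]
    have := List.length_filter_le (fun x => decide (x < p)) rest
    simp at this ⊢; omega
  · simp only [List.filter_cons, decide_eq_true_eq, lt_irrefl, if_false]
    have := List.length_filter_le (fun x => decide (p < x)) rest
    simp at this ⊢; omega

def compute_size_buckets_alt (char_counts : List Int) : List (String × Int × Int) :=
  let n := char_counts.length
  if n = 0 then []
  else if n < 4 then
    (List.range n).map (fun (i : Nat) =>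
      ("Q" ++ PySem.Int.toStr ((i : Int) + 1), (pvKth char_counts i, pvKth char_counts i)))
  else
    let q1 := pvKth char_counts (n / 4)
    let q2 := pvKth char_counts (n / 2)
    let q3 := pvKth char_counts (3 * n / 4)
    [("Q1", (pvKth char_counts 0, q1)),
     ("Q2", (q1 + 1, q2)),
     ("Q3", (q2 + 1, q3)),
     ("Q4", (q3 + 1, pvKth char_counts (n - 1)))]

-- ===== PRECONDITION & SPEC =====
def Spec_compute_size_buckets (char_counts : List Int) (out : List (String × Int × Int)) : Prop := out = compute_size_buckets_alt char_counts
instance (char_counts : List Int) (out : List (String × Int × Int)) : Decidable (Spec_compute_size_buckets char_counts out) := by unfold Spec_compute_size_buckets; infer_instance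

-- ===== CLAIM (what is proved, stated in full; the proofs are below) =====
def Claim_equal_compute_size_buckets : Prop := ∀ (char_counts : List Int), Dom_compute_size_buckets char_counts → Spec_compute_size_buckets char_counts (compute_size_buckets char_counts)

-- ===== LEMMAS AND PROOFS =====

lemma perm_part (xs : List Int) (p : Int) :
    (xs.filter (fun x => decide (x < p)) ++ (xs.filter (fun x => decide (x = p)) ++ xs.filter (fun x => decide (p < x)))).Perm xs := by
  have h1 := List.filter_append_perm (fun x => decide (x < p)) xs
  have h2 := List.filter_append_perm (fun x => decide (x = p)) (xs.filter (fun x => !decide (x < p)))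
  rw [List.filter_filter, List.filter_filter] at h2
  have e1 : xs.filter (fun a => decide (a = p) && !decide (a < p)) = xs.filter (fun x => decide (x = p)) := by
    apply List.filter_congr; intro x _; by_cases h : x = p <;> simp [h]
  have e2 : xs.filter (fun a => !decide (a = p) && !decide (a < p)) = xs.filter (fun x => decide (p < x)) := by
    apply List.filter_congr; intro x _
    by_cases h : p < x <;> simp [h] <;> omega
  rw [e1, e2] at h2
  exact (List.Perm.append_left _ h2).trans h1

lemma sorted_partition (xs : List Int) (p : Int) :
    PySem.List.sorted xs (fun x => x) false =
      PySem.List.sorted (xs.filter (fun x => decide (x < p))) (fun x => x) false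
      ++ (xs.filter (fun x => decide (x = p))
      ++ PySem.List.sorted (xs.filter (fun x => decide (p < x))) (fun x => x) false) := by
  apply PySem.List.sorted_id_eq_of_perm_of_pairwise
  · refine List.Perm.trans ?_ (perm_part xs p)
    exact ((PySem.List.sorted_perm _ _ _).append ((List.Perm.refl _).append (PySem.List.sorted_perm _ _ _)))
  · rw [List.pairwise_append]
    refine ⟨PySem.List.sorted_pairwise _ _, ?_, ?_⟩
    · rw [List.pairwise_append]
      refine ⟨?_, PySem.List.sorted_pairwise _ _, ?_⟩
      · -- middle all = p
        apply List.pairwise_of_forall_mem_list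
        intro a ha b hb
        simp at ha hb; omega
      · intro a ha b hb
        have ha' : a ∈ xs.filter (fun x => decide (x = p)) := ha
        have hb' : b ∈ xs.filter (fun x => decide (p < x)) := (PySem.List.mem_sorted _ _ _ _).mp hb
        simp at ha' hb'; omega
    · intro a ha b hb
      have ha' : a ∈ xs.filter (fun x => decide (x < p)) := (PySem.List.mem_sorted _ _ _ _).mp ha
      simp at ha'
      rcases List.mem_append.mp hb with h | h
      · simp at h; omega
      · have := (PySem.List.mem_sorted _ _ _ _).mp h
        simp at this; omega

lemma pvKth_eq_sorted_aux : ∀ (N : Nat) (xs : List Int) (k : Nat), xs.length ≤ N → k < xs.length →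
    pvKth xs k = (PySem.List.sorted xs (fun x => x) false).getD k 0 := by
  intro N
  induction N with
  | zero => intro xs k h hk; omega
  | succ N ih =>
    intro xs k h hk
    match xs with
    | [] => simp at hk
    | p :: rest =>
      set xs := p :: rest with hxs
      set a := xs.filter (fun x => decide (x < p)) with ha
      set m := xs.filter (fun x => decide (x = p)) with hm
      set g := xs.filter (fun x => decide (p < x)) with hg
      have hlen : a.length + (m.length + g.length) = xs.length := by
        have := (perm_part xs p).length_eq; simpa using this
      have hla : a.length < xs.length := by
        rw [ha, hxs]
        simp only [List.filter_cons, decide_eq_true_eq, lt_irrefl, if_false]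
        have := List.length_filter_le (fun x => decide (x < p)) rest
        simp at this ⊢; omega
      have hlg : g.length < xs.length := by
        rw [hg, hxs]
        simp only [List.filter_cons, decide_eq_true_eq, lt_irrefl, if_false]
        have := List.length_filter_le (fun x => decide (p < x)) rest
        simp at this ⊢; omega
      have hcount : xs.countP (fun x => decide (x = p)) = m.length := by
        rw [hm]; exact List.countP_eq_length_filter
      have hA : (PySem.List.sorted a (fun x => x) false).length = a.length := by
        exact (PySem.List.sorted_perm a (fun x => x) false).length_eq
      have hG : (PySem.List.sorted g (fun x => x) false).length = g.length := by
        exact (PySem.List.sorted_perm g (fun x => x) false).length_eq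
      rw [pvKth]
      simp only [← hxs, ← ha, ← hg, hcount]
      rw [sorted_partition xs p, ← ha, ← hm, ← hg]
      by_cases h1 : k < a.length
      · rw [if_pos h1, List.getD_append _ _ _ _ (by omega)]
        exact ih a k (by omega) (by omega)
      · rw [if_neg h1, List.getD_append_right _ _ _ _ (by omega)]
        by_cases h2 : k < a.length + m.length
        · rw [if_pos h2, List.getD_append _ _ _ _ (by omega),
            List.getD_eq_getElem _ _ (by rw [hA]; omega)]
          have hmem := List.getElem_mem (l := m) (n := k - (PySem.List.sorted a (fun x => x) false).length) (h := by rw [hA]; omega)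
          have hall : ∀ y ∈ m, y = p := by
            intro y hy; rw [hm, List.mem_filter] at hy; exact of_decide_eq_true hy.2
          exact (hall _ hmem).symm
        · rw [if_neg h2, List.getD_append_right _ _ _ _ (by rw [hA]; omega)]
          have := ih g (k - a.length - m.length) (by omega) (by omega)
          rw [this, hA]

lemma pvKth_eq_sorted (xs : List Int) (k : Nat) (hk : k < xs.length) :
    pvKth xs k = (PySem.List.sorted xs (fun x => x) false).getD k 0 :=
  pvKth_eq_sorted_aux xs.length xs k le_rfl hk

-- ===== VERDICT (by name: the statement is the Claim_ definition above) =====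
theorem compute_size_buckets_spec : Claim_equal_compute_size_buckets := by
  intro xs _
  unfold Spec_compute_size_buckets compute_size_buckets compute_size_buckets_alt
  by_cases hnil : xs = []
  · simp [hnil]
  · have hpos : 0 < xs.length := List.length_pos_iff.mpr hnil
    rw [if_neg hnil]
    simp only []
    set s := PySem.List.sorted xs (fun x => x) false with hs
    have hsl : s.length = xs.length := (PySem.List.sorted_perm xs (fun x => x) false).length_eq
    rw [if_neg (show ¬ xs.length = 0 by omega)]
    by_cases h4 : xs.length < 4
    · rw [if_pos (show (s.length : Int) < 4 by exact_mod_cast hsl ▸ h4), if_pos h4]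
      have key : ∀ j : Nat, j < xs.length → pvKth xs j = s.getD j 0 := by
        intro j hj; rw [pvKth_eq_sorted xs j hj, ← hs]
      have h123 : xs.length = 1 ∨ xs.length = 2 ∨ xs.length = 3 := by omega
      rcases h123 with h | h | h
      · obtain ⟨a, ha⟩ := List.length_eq_one_iff.mp (show s.length = 1 by omega)
        rw [h, ha]
        simp [PySem.List.enumerate, PySem.Dict.insert, PySem.Dict.empty,
          PySem.Dict.contains, List.range_succ, key 0 (by omega), ha]
      · obtain ⟨a, b, ha⟩ := List.length_eq_two.mp (show s.length = 2 by omega)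
        rw [h, ha]
        simp [PySem.List.enumerate, PySem.Dict.insert, PySem.Dict.empty,
          PySem.Dict.contains, List.range_succ, key 0 (by omega), key 1 (by omega), ha,
          show PySem.Int.toStr 1 ≠ PySem.Int.toStr 2 from by decide]
      · obtain ⟨a, b, c, ha⟩ := List.length_eq_three.mp (show s.length = 3 by omega)
        rw [h, ha]
        simp [PySem.List.enumerate, PySem.Dict.insert, PySem.Dict.empty,
          PySem.Dict.contains, List.range_succ, key 0 (by omega), key 1 (by omega), key 2 (by omega), ha,
          show PySem.Int.toStr 1 ≠ PySem.Int.toStr 2 from by decide,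
          show PySem.Int.toStr 1 ≠ PySem.Int.toStr 3 from by decide,
          show PySem.Int.toStr 2 ≠ PySem.Int.toStr 3 from by decide]
    · rw [if_neg (show ¬ (s.length : Int) < 4 by exact_mod_cast hsl ▸ h4), if_neg h4]
      have key : ∀ j : Nat, j < xs.length → (PySem.List.pyGet? s (j : Int)).getD 0 = pvKth xs j := by
        intro j hj
        rw [PySem.List.pyGet?_natCast, pvKth_eq_sorted xs j hj, ← hs, List.getD_eq_getElem?_getD]
      have c1 : PySem.Int.floordiv (s.length : Int) 4 = ((xs.length / 4 : Nat) : Int) := by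
        rw [hsl, PySem.Int.floordiv_eq_ediv_of_pos (by norm_num)]; exact_mod_cast (Int.natCast_div _ _).symm
      have c2 : PySem.Int.floordiv (s.length : Int) 2 = ((xs.length / 2 : Nat) : Int) := by
        rw [hsl, PySem.Int.floordiv_eq_ediv_of_pos (by norm_num)]; exact_mod_cast (Int.natCast_div _ _).symm
      have c3 : PySem.Int.floordiv (3 * (s.length : Int)) 4 = ((3 * xs.length / 4 : Nat) : Int) := by
        rw [hsl, PySem.Int.floordiv_eq_ediv_of_pos (by norm_num)]
        have : (3 : Int) * (xs.length : Int) = ((3 * xs.length : Nat) : Int) := by push_cast; ring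
        rw [this]; exact_mod_cast (Int.natCast_div _ _).symm
      have k0 : (PySem.List.pyGet? s 0).getD 0 = pvKth xs 0 := by
        have := key 0 (by omega); exact_mod_cast this
      have klast : (PySem.List.pyGet? s (-1)).getD 0 = pvKth xs (xs.length - 1) := by
        rw [PySem.List.pyGet?_neg_one, List.getLast?_eq_getElem?, pvKth_eq_sorted xs _ (by omega),
          ← hs, List.getD_eq_getElem?_getD, hsl]
      rw [c1, c2, c3, key _ (by omega), key _ (by omega), key _ (by omega), k0, klast]
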